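-- pv_equiv track=rewrite | github.com/baxt1or/leetcode_algorithms_and_data_structure | Hash Table/1090. Largest Values From Labels/solution.py | largestValsFromLabels
-- ===== SOURCE A (Python) =====
-- from collections import Counter
-- from typing import List
--
-- def largestValsFromLabels(values: List[int], labels: List[int], numWanted: int, useLimit: int) -> int:
--
--     items = [(val, labels) for val, labels in zip(values, labels)]
--
--     items = sorted(items, key=lambda item:item[0], reverse=True)
--
--     count = Counter()
--
--     total = 0
--     total_picked = 0
--
--     for val, label in items:
--
--         if total_picked < numWanted and count[label] < useLimit:
--             total+=val
--             total_picked+=1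
--             count[label] +=1
--
--     return total
-- ===== SOURCE B (Python) =====
-- def largestValsFromLabels(values, labels, numWanted, useLimit):
--     if numWanted <= 0 or useLimit <= 0:
--         return 0
--     groups = {}
--     for v, l in zip(values, labels):
--         groups[l] = groups.get(l, []) + [v]
--     pool = []
--     for vals in groups.values():
--         pool += sorted(vals, reverse=True)[:useLimit]
--     return sum(sorted(pool, reverse=True)[:numWanted])
-- ===== Notes on version B (the rewrite author's own statement) =====
-- stated objective: alternative
-- what changed: Replaces the global-sorted greedy scan with a stateful per-label Counter by a two-phase group-then-select: bucket values by label, keep each label's top useLimit values, then sum the top numWanted of the merged pool.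
import Mathlib
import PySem

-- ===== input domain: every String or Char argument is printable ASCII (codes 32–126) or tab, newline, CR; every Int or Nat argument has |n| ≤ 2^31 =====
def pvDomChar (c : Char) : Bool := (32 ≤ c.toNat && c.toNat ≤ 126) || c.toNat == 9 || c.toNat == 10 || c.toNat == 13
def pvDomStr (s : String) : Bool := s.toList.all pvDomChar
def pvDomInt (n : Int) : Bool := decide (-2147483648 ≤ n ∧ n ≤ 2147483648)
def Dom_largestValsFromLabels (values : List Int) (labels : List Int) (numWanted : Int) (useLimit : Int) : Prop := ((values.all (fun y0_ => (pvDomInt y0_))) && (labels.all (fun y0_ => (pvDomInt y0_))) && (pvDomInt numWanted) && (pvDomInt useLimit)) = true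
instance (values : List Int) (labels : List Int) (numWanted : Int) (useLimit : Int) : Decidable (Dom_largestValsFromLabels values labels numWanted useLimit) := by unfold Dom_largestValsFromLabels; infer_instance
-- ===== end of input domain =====

-- B replaces A's global-sorted greedy scan with a per-label Counter by a two-phase
-- group-then-select (bucket by label, keep each label's top useLimit, sum the top
-- numWanted of the merged pool) — an alternative decomposition of the same cost.

-- ===== PORT A =====
def largestValsFromLabels (values : List Int) (labels : List Int) (numWanted : Int) (useLimit : Int) : Int :=
  let items := values.zip labels
  let items := PySem.List.sorted items (fun item => item.1) true
  (items.foldl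
    (fun (st : PySem.Dict Int Int × Int × Int) vl =>
      if st.2.2 < numWanted ∧ st.1.getD vl.2 0 < useLimit then
        (st.1.modify vl.2 0 (· + 1), st.2.1 + vl.1, st.2.2 + 1)
      else st)
    (PySem.Dict.empty, 0, 0)).2.1

-- ===== PORT B =====
def largestValsFromLabels_alt (values : List Int) (labels : List Int) (numWanted : Int) (useLimit : Int) : Int :=
  if numWanted ≤ 0 ∨ useLimit ≤ 0 then 0
  else
    let groups := (values.zip labels).foldl
      (fun (d : PySem.Dict Int (List Int)) vl => d.modify vl.2 [] (· ++ [vl.1]))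
      PySem.Dict.empty
    let pool := groups.values.foldl
      (fun acc vs => acc ++ PySem.List.slice (PySem.List.sorted vs (fun x => x) true) none (some useLimit))
      []
    (PySem.List.slice (PySem.List.sorted pool (fun x => x) true) none (some numWanted)).sum

-- ===== PRECONDITION & SPEC =====
def Spec_largestValsFromLabels (values : List Int) (labels : List Int) (numWanted : Int) (useLimit : Int) (out : Int) : Prop := out = largestValsFromLabels_alt values labels numWanted useLimit
instance (values : List Int) (labels : List Int) (numWanted : Int) (useLimit : Int) (out : Int) : Decidable (Spec_largestValsFromLabels values labels numWanted useLimit out) := by unfold Spec_largestValsFromLabels; infer_instance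

-- ===== CLAIM (what is proved, stated in full; the proofs are below) =====
def Claim_equal_largestValsFromLabels : Prop := ∀ (values : List Int) (labels : List Int) (numWanted : Int) (useLimit : Int), Dom_largestValsFromLabels values labels numWanted useLimit → Spec_largestValsFromLabels values labels numWanted useLimit (largestValsFromLabels values labels numWanted useLimit)

-- ===== LEMMAS AND PROOFS =====

-- The list of items A's greedy keeps when only the per-label cap (not numWanted) is
-- enforced, scanning left to right with counter state c.
def capA (u : Int) : PySem.Dict Int Int → List (Int × Int) → List (Int × Int)
  | _, [] => []
  | c, vl :: xs =>
    if c.getD vl.2 0 < u then vl :: capA u (c.modify vl.2 0 (· + 1)) xs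
    else capA u c xs

-- A's fold = old total + sum of the first (numWanted - picked) values capA keeps.
theorem foldA_eq (nw u : Int) : ∀ (xs : List (Int × Int)) (c : PySem.Dict Int Int) (t p : Int),
    (xs.foldl
      (fun (st : PySem.Dict Int Int × Int × Int) vl =>
        if st.2.2 < nw ∧ st.1.getD vl.2 0 < u then
          (st.1.modify vl.2 0 (· + 1), st.2.1 + vl.1, st.2.2 + 1)
        else st)
      (c, t, p)).2.1
    = t + (((capA u c xs).take (nw - p).toNat).map (·.1)).sum := by
  intro xs
  induction xs with
  | nil => intro c t p; simp [capA]
  | cons vl xs ih =>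
    intro c t p
    simp only [List.foldl_cons, capA]
    by_cases hcnt : c.getD vl.2 0 < u
    · by_cases hp : p < nw
      · simp only [hcnt, hp, and_self, if_pos]
        rw [ih]
        have h1 : (nw - p).toNat = (nw - (p + 1)).toNat + 1 := by omega
        rw [h1, List.take_succ_cons]
        simp; ring
      · have : ¬ (p < nw ∧ c.getD vl.2 0 < u) := by tauto
        rw [if_neg this, ih]
        have h0 : (nw - p).toNat = 0 := by omega
        simp [hcnt, h0]
    · have : ¬ (p < nw ∧ c.getD vl.2 0 < u) := by tauto
      rw [if_neg this, ih, if_neg hcnt]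

theorem capA_sublist (u : Int) : ∀ (xs : List (Int × Int)) (c : PySem.Dict Int Int),
    (capA u c xs).Sublist xs := by
  intro xs
  induction xs with
  | nil => intro c; simp [capA]
  | cons vl xs ih =>
    intro c
    simp only [capA]
    split
    · exact (ih _).cons₂ vl
    · exact (ih _).cons vl

-- Restricted to one label, capA keeps exactly the first (u - seen) matching items.
theorem capA_filter (u : Int) (l : Int) : ∀ (xs : List (Int × Int)) (c : PySem.Dict Int Int),
    (capA u c xs).filter (fun x => x.2 == l)
      = (xs.filter (fun x => x.2 == l)).take (u - c.getD l 0).toNat := by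
  intro xs
  induction xs with
  | nil => intro c; simp [capA]
  | cons vl xs ih =>
    intro c
    by_cases hl : vl.2 = l
    · have hbeq : (vl.2 == l) = true := by simp [hl]
      by_cases hcnt : c.getD vl.2 0 < u
      · have hc' : (c.modify vl.2 0 (· + 1)).getD l 0 = c.getD l 0 + 1 := by
          rw [← hl]; exact PySem.Dict.getD_modify_self c vl.2 0 (· + 1)
        have h1 : (u - c.getD l 0).toNat = (u - (c.getD l 0 + 1)).toNat + 1 := by
          rw [← hl]; omega
        simp only [capA]
        rw [if_pos hcnt, List.filter_cons, List.filter_cons, hbeq]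
        simp only [if_true]
        rw [ih, hc', h1, List.take_succ_cons]
      · have h0 : (u - c.getD l 0).toNat = 0 := by rw [← hl]; omega
        simp only [capA]
        rw [if_neg hcnt, ih, h0, List.filter_cons, hbeq]
        simp
    · have hbeq : (vl.2 == l) = false := by simp [hl]
      have hc' : ∀ f : Int → Int, (c.modify vl.2 0 f).getD l 0 = c.getD l 0 := by
        intro f; exact PySem.Dict.getD_modify_of_ne c 0 f (fun h => hl h.symm)
      by_cases hcnt : c.getD vl.2 0 < u
      · simp only [capA]
        rw [if_pos hcnt, List.filter_cons, List.filter_cons, hbeq, ih, hc']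
        simp
      · simp only [capA]
        rw [if_neg hcnt, ih, List.filter_cons, hbeq]
        simp

theorem capA_nil_of_nonpos (u : Int) (hu : u ≤ 0) : ∀ (xs : List (Int × Int)),
    capA u PySem.Dict.empty xs = [] := by
  intro xs
  induction xs with
  | nil => simp [capA]
  | cons vl xs ih =>
    simp only [capA, PySem.Dict.getD_empty]
    rw [if_neg (by omega)]
    exact ih

-- Partitioning a list of labelled items over a duplicate-free list containing all labels.
theorem perm_flatMap_filter : ∀ (L : List Int) (xs : List (Int × Int)), L.Nodup →
    (∀ x ∈ xs, x.2 ∈ L) →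
    (L.flatMap fun l => xs.filter (fun x => x.2 == l)).Perm xs := by
  intro L
  induction L with
  | nil =>
    intro xs _ hmem
    cases xs with
    | nil => simp
    | cons x xs => exact absurd (hmem x (by simp)) (by simp)
  | cons l L ih =>
    intro xs hnd hmem
    simp only [List.flatMap_cons]
    have hcongr : (L.flatMap fun l' => xs.filter (fun x => x.2 == l'))
        = L.flatMap fun l' => (xs.filter (fun x => !(x.2 == l))).filter (fun x => x.2 == l') := by
      apply List.flatMap_congr
      intro l' hl'
      have hne : l' ≠ l := by
        intro h; exact (List.nodup_cons.mp hnd).1 (h ▸ hl')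
      rw [List.filter_filter]
      apply List.filter_congr
      intro x _
      by_cases hx : x.2 = l'
      · simp [hx, hne]
      · simp [hx]
    rw [hcongr]
    have hperm := ih (xs.filter (fun x => !(x.2 == l))) (List.nodup_cons.mp hnd).2 (by
      intro x hx
      rw [List.mem_filter] at hx
      have := hmem x hx.1
      simp only [List.mem_cons] at this
      rcases this with h | h
      · exfalso; simp [h] at hx
      · exact h)
    refine List.Perm.trans ?_ (List.filter_append_perm (fun x => x.2 == l) xs)
    exact hperm.append_left _

theorem slice_to_of_nonneg {α : Type} (xs : List α) (b : Int) (hb : 0 ≤ b) :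
    PySem.List.slice xs none (some b) = xs.take b.toNat := by
  simp only [PySem.List.slice, PySem.List.clampIdx]
  rw [if_neg (by omega)]
  simp only [Nat.sub_zero, List.drop_zero]
  rw [← List.take_take, List.take_length]

-- pairwise-descending helper: turn "later ≤ earlier" into "-x ≤ -y" form
theorem pairwise_neg_of_ge {l : List Int} (h : l.Pairwise (fun a b => b ≤ a)) :
    l.Pairwise (fun a b => -a ≤ -b) := List.Pairwise.imp (fun hab => by omega) h

-- A's value: sum of the first numWanted values kept by the pure per-label cap scan.
theorem portA_eq (values labels : List Int) (nw u : Int) :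
    largestValsFromLabels values labels nw u
      = (((capA u PySem.Dict.empty
            (PySem.List.sorted (values.zip labels) (fun item => item.1) true)).take nw.toNat).map (·.1)).sum := by
  simp only [largestValsFromLabels]
  rw [foldA_eq nw u]
  simp

theorem portB_eq (values labels : List Int) (nw u : Int) (h1 : 0 < nw) (h2 : 0 < u) :
    largestValsFromLabels_alt values labels nw u
      = (((capA u PySem.Dict.empty
            (PySem.List.sorted (values.zip labels) (fun item => item.1) true)).map (·.1)).take nw.toNat).sum := by
  have hng : ¬ (nw ≤ 0 ∨ u ≤ 0) := by omega
  simp only [largestValsFromLabels_alt, if_neg hng]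
  set Z := values.zip labels with hZdef
  set S := PySem.List.sorted Z (fun item => item.1) true with hSdef
  set capL := capA u PySem.Dict.empty S with hcapdef
  set groups := Z.foldl (fun (d : PySem.Dict Int (List Int)) vl => d.modify vl.2 [] (· ++ [vl.1])) PySem.Dict.empty with hgdef
  -- the grouping dict: keys and lookups
  have hkeys : groups.keys = PySem.Set.ofList (Z.map (fun x => x.2)) := by
    rw [hgdef, PySem.Dict.keys_foldl_modify_key Z (fun vl => vl.2) [] (fun _ vl => (· ++ [vl.1]))]
    have : (PySem.Dict.empty : PySem.Dict Int (List Int)).keys = [] := by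
      simp [PySem.Dict.keys, PySem.Dict.empty]
    rw [this, PySem.Set.update_nil_left]
  have hnodup : groups.keys.Nodup := by
    rw [hkeys]; exact PySem.Set.nodup_ofList _
  have hgetD : ∀ lb : Int, groups.getD lb [] = ((Z.filter (fun x => x.2 == lb)).map (fun x => x.1)) := by
    intro lb
    have hfold : groups = (Z.map Prod.swap).foldl (fun d p => d.modify p.1 [] (· ++ [p.2])) PySem.Dict.empty := by
      rw [List.foldl_map]
      rfl
    rw [hfold, PySem.Dict.getD_foldl_modify_append]
    rw [PySem.Dict.getD_empty]
    rw [List.filter_map, List.map_map]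
    simp [Function.comp_def]
  -- the pool is a flatMap over the (distinct) keys
  have hpool : groups.values.foldl
      (fun acc vs => acc ++ PySem.List.slice (PySem.List.sorted vs (fun x => x) true) none (some u)) []
      = groups.keys.flatMap
          (fun k => (PySem.List.sorted (groups.getD k []) (fun x => x) true).take u.toNat) := by
    rw [PySem.List.foldl_append_eq_flatMap]
    rw [PySem.Dict.values_eq_map_keys groups hnodup []]
    rw [List.flatMap_map]
    simp only [List.nil_append]
    apply List.flatMap_congr
    intro k _
    exact slice_to_of_nonneg _ u (by omega)
  rw [hpool]
  -- each label's sorted bucket is the label's subsequence of the globally sorted list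
  have hlab : ∀ lb : Int,
      PySem.List.sorted ((Z.filter (fun x => x.2 == lb)).map (fun x => x.1)) (fun x => x) true
        = (S.filter (fun x => x.2 == lb)).map (fun x => x.1) := by
    intro lb
    apply PySem.List.eq_of_perm_of_pairwise_le_of_injective (key := fun x : Int => -x) neg_injective
    · refine (PySem.List.sorted_perm _ _ _).trans ?_
      exact (((PySem.List.sorted_perm Z (fun item => item.1) true).filter _).map _).symm
    · exact pairwise_neg_of_ge (PySem.List.sorted_pairwise_rev _ _)
    · apply pairwise_neg_of_ge
      have hS : S.Pairwise (fun a b : Int × Int => b.1 ≤ a.1) :=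
        PySem.List.sorted_pairwise_rev Z (fun item => item.1)
      exact List.pairwise_map.mpr (List.Pairwise.sublist List.filter_sublist hS)
  -- the per-label top-useLimit slice is exactly what the cap scan keeps for that label
  have hcapf : ∀ lb : Int,
      ((S.filter (fun x => x.2 == lb)).map (fun x => x.1)).take u.toNat
        = (capL.filter (fun x => x.2 == lb)).map (fun x => x.1) := by
    intro lb
    rw [hcapdef, capA_filter, PySem.Dict.getD_empty]
    rw [← List.map_take]
    congr 2
    omega
  have hflat : groups.keys.flatMap
        (fun k => (PySem.List.sorted (groups.getD k []) (fun x => x) true).take u.toNat)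
      = (groups.keys.flatMap (fun k => capL.filter (fun x => x.2 == k))).map (fun x => x.1) := by
    rw [List.map_flatMap]
    apply List.flatMap_congr
    intro k _
    rw [hgetD k, hlab k, hcapf k]
  rw [hflat]
  -- the flatMap over distinct labels is a permutation of the cap scan's list
  have hmemk : ∀ x ∈ capL, x.2 ∈ groups.keys := by
    intro x hx
    have hxS : x ∈ S := (capA_sublist u S PySem.Dict.empty).mem hx
    have hxZ : x ∈ Z := (PySem.List.sorted_perm Z (fun item => item.1) true).mem_iff.mp hxS
    rw [hkeys, PySem.Set.mem_ofList]
    exact List.mem_map_of_mem hxZ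
  have hperm : (groups.keys.flatMap (fun k => capL.filter (fun x => x.2 == k))).Perm capL :=
    perm_flatMap_filter groups.keys capL hnodup hmemk
  have hcapP : (capL.map (fun x => x.1)).Pairwise (fun a b : Int => b ≤ a) := by
    have hS : S.Pairwise (fun a b : Int × Int => b.1 ≤ a.1) :=
      PySem.List.sorted_pairwise_rev Z (fun item => item.1)
    exact List.pairwise_map.mpr (List.Pairwise.sublist (capA_sublist u S PySem.Dict.empty) hS)
  have hsorted_eq :
      PySem.List.sorted ((groups.keys.flatMap (fun k => capL.filter (fun x => x.2 == k))).map (fun x => x.1))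
          (fun x => x) true
        = capL.map (fun x => x.1) := by
    apply PySem.List.eq_of_perm_of_pairwise_le_of_injective (key := fun x : Int => -x) neg_injective
    · exact (PySem.List.sorted_perm _ _ _).trans (hperm.map _)
    · exact pairwise_neg_of_ge (PySem.List.sorted_pairwise_rev _ _)
    · exact pairwise_neg_of_ge hcapP
  rw [hsorted_eq, slice_to_of_nonneg _ nw (by omega)]

-- ===== VERDICT (by name: the statement is the Claim_ definition above) =====
theorem largestValsFromLabels_spec : Claim_equal_largestValsFromLabels := by
  intro values labels nw u _
  unfold Spec_largestValsFromLabels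
  by_cases h1 : 0 < nw
  · by_cases h2 : 0 < u
    · rw [portA_eq, portB_eq values labels nw u h1 h2, List.map_take]
    · have hA : largestValsFromLabels values labels nw u = 0 := by
        rw [portA_eq, capA_nil_of_nonpos u (by omega)]
        simp
      have hB : largestValsFromLabels_alt values labels nw u = 0 := by
        simp only [largestValsFromLabels_alt]
        rw [if_pos (by omega)]
      rw [hA, hB]
  · have hA : largestValsFromLabels values labels nw u = 0 := by
      rw [portA_eq]
      have : nw.toNat = 0 := by omega
      simp [this]
    have hB : largestValsFromLabels_alt values labels nw u = 0 := by
      simp only [largestValsFromLabels_alt]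
      rw [if_pos (by omega)]
    rw [hA, hB]
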